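-- pv_equiv track=rewrite | github.com/ALTA-DE1-Huda-Azi-Agista-12081998/Basic-Programming---OOP | Part 1 - Data Structure and Algorithm/problem 4 - Prima Segi 4.py | generate_primes_grid
-- ===== SOURCE A (Python) =====
-- def is_prime(num):
--     if num < 2:
--         return False
--     for i in range(2, int(num**0.5) + 1):
--         if num % i == 0:
--             return False
--     return True
--
-- def generate_primes_grid(width, height, start):
--     result = ""  # This is where we'll build our grid.
--
--     current_number = start  # We start with the given starting number.
--
--     # Loop through each row
--     for i in range(height):
--         row = ""  # This is where we'll build the numbers for each row.
--
--         # Loop through each column in the row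
--         for j in range(width):
--             # Find the next prime number
--             while not is_prime(current_number):
--                 current_number += 1
--
--             # Add the prime number to the row
--             row += str(current_number) + ", "
--             current_number += 1  # Move to the next number
--
--         # Add the row to the result, removing the trailing comma and space
--         result += row.rstrip(", ") + "\n"
--
--     return result
-- ===== SOURCE B (Python) =====
-- def _is_prime2(n):
--     # 6k+-1 wheel trial division
--     if n < 2:
--         return False
--     if n < 4:
--         return True
--     if n % 2 == 0 or n % 3 == 0:
--         return False
--     f = 5
--     while f * f <= n:
--         if n % f == 0 or n % (f + 2) == 0:
--             return False
--         f += 6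
--     return True
--
-- def _next_prime(n):
--     while not _is_prime2(n):
--         n += 1
--     return n
--
-- def generate_primes_grid(width, height, start):
--     k = max(width, 0) * max(height, 0)
--     primes = []
--     n = start
--     for _ in range(k):
--         n = _next_prime(n)
--         primes.append(n)
--         n += 1
--     out = ""
--     for r in range(height):
--         row = primes[r * width:(r + 1) * width]
--         out += ", ".join(str(p) for p in row) + "\n"
--     return out
-- ===== Notes on version B (the rewrite author's own statement) =====
-- stated objective: faster
-- what changed: B tests primality with a 6k±1 wheel (checking 2 and 3, then only candidates f and f+2 for f = 5, 11, 17, ... while f*f <= n) instead of A's trial division by every integer in 2..isqrt(n), and builds the grid by collecting one flat list of width*height primes, slicing it into rows and ', '.join-ing each row, instead of A's appending ', ' after every prime and rstrip-ping it back off per row.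
import Mathlib
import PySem

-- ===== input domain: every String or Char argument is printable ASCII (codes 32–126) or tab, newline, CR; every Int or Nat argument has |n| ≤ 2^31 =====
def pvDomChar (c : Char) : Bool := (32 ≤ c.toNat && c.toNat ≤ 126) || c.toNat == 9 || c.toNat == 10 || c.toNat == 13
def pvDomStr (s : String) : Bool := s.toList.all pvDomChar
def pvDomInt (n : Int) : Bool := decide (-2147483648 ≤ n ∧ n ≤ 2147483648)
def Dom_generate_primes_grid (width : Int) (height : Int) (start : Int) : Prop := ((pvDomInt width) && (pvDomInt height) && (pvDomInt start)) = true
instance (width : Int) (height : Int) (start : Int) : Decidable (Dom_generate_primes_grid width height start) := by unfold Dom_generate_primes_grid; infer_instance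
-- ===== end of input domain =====

-- B replaces A's every-integer trial division by a 6k±1 wheel test and builds the grid
-- by slicing one flat list of primes and joining each row, instead of appending ", "
-- after every prime and stripping it back off; return value proved identical.

-- ===== PORT A =====
-- is_prime: trial division over range(2, int(num**0.5)+1).
-- int(num**0.5) is ported as Nat.sqrt: for 2 ≤ num ≤ 2^31 the double sqrt is exact
-- (correctly rounded and far from integer boundaries), so int(num**0.5) = isqrt(num).
def pvIsPrimeA (num : Int) : Bool :=
  if num < 2 then false
  else (PySem.List.pyRange 2 ((Nat.sqrt num.toNat : Int) + 1) 1).all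
        (fun i => !(PySem.Int.mod num i == 0))

-- the 'while not is_prime(current_number): current_number += 1' loop, made total with
-- fuel; both ports search with the same fuel 2^64 (the loop stops at the first prime,
-- so only the steps actually taken are ever computed)
def pvNextA (fuel : Nat) (n : Int) : Int :=
  match fuel with
  | 0 => n
  | Nat.succ fuel => if pvIsPrimeA n then n else pvNextA fuel (n + 1)

-- exact port of row.rstrip(", "): drop trailing characters that are ',' or ' '
def pvRstripCS (s : String) : String :=
  String.ofList ((s.toList.reverse.dropWhile (fun c => c == ',' || c == ' ')).reverse)

def generate_primes_grid (width : Int) (height : Int) (start : Int) : String :=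
  ((PySem.List.pyRange 0 height 1).foldl (fun (st : String × Int) _ =>
      let inner := (PySem.List.pyRange 0 width 1).foldl (fun (st2 : String × Int) _ =>
          let p := pvNextA 18446744073709551616 st2.2
          (st2.1 ++ (PySem.Int.toStr p ++ ", "), p + 1)) ("", st.2)
      (st.1 ++ (pvRstripCS inner.1 ++ "\n"), inner.2)) ("", start)).1

-- ===== PORT B =====
-- the 'while f * f <= n' wheel loop of _is_prime2 (f = 5, 11, 17, … kept as a natural
-- number; fuel n.toNat bounds the iteration count, which never exceeds sqrt(n)/6 + 1)
def pvWheelB (fuel : Nat) (n : Int) (f : Nat) : Bool :=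
  match fuel with
  | 0 => true
  | Nat.succ fuel =>
    if (f : Int) * (f : Int) ≤ n then
      if PySem.Int.mod n f == 0 || PySem.Int.mod n ((f : Int) + 2) == 0 then false
      else pvWheelB fuel n (f + 6)
    else true

def pvIsPrimeB (n : Int) : Bool :=
  if n < 2 then false
  else if n < 4 then true
  else if PySem.Int.mod n 2 == 0 || PySem.Int.mod n 3 == 0 then false
  else pvWheelB n.toNat n 5

-- _next_prime: same while-loop shape as A's, with the same fuel
def pvNextB (fuel : Nat) (n : Int) : Int :=
  match fuel with
  | 0 => n
  | Nat.succ fuel => if pvIsPrimeB n then n else pvNextB fuel (n + 1)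

-- the 'for _ in range(k): n = _next_prime(n); primes.append(n); n += 1' loop
def pvPrimesB (k : Nat) (c : Int) : List Int :=
  match k with
  | 0 => []
  | Nat.succ k => let p := pvNextB 18446744073709551616 c; p :: pvPrimesB k (p + 1)

def generate_primes_grid_alt (width : Int) (height : Int) (start : Int) : String :=
  let ps := pvPrimesB ((max width 0 * max height 0).toNat) start
  (PySem.List.pyRange 0 height 1).foldl (fun out r =>
    out ++ (PySem.Str.join ", "
      ((PySem.List.slice ps (some (r * width)) (some ((r + 1) * width))).map PySem.Int.toStr)
      ++ "\n")) ""

-- ===== PRECONDITION & SPEC =====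
def Spec_generate_primes_grid (width : Int) (height : Int) (start : Int) (out : String) : Prop :=
  out = generate_primes_grid_alt width height start
instance (width : Int) (height : Int) (start : Int) (out : String) :
    Decidable (Spec_generate_primes_grid width height start out) := by
  unfold Spec_generate_primes_grid; infer_instance

-- ===== CLAIM =====
def Claim_equal_generate_primes_grid : Prop :=
  ∀ (width : Int) (height : Int) (start : Int), Dom_generate_primes_grid width height start →
    Spec_generate_primes_grid width height start (generate_primes_grid width height start)

-- ===== LEMMAS AND PROOFS =====

-- ---- the two primality tests agree: both decide `2 ≤ n ∧ (n.toNat).Prime` ----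

theorem pvNotPrime (n : Int) (d : Nat) (hd2 : 2 ≤ d) (hdn : (d : Int) < n)
    (hdvd : (d : Int) ∣ n) : ¬ Nat.Prime n.toNat := by
  intro hp
  have hn0 : ((n.toNat : Int)) = n := Int.toNat_of_nonneg (by omega)
  have hdvd' : d ∣ n.toNat := by rw [← hn0] at hdvd; exact_mod_cast hdvd
  rcases hp.eq_one_or_self_of_dvd d hdvd' with h1 | h1
  · omega
  · omega

theorem pvIsPrimeA_iff (n : Int) : pvIsPrimeA n = true ↔ 2 ≤ n ∧ Nat.Prime n.toNat := by
  unfold pvIsPrimeA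
  by_cases hn : n < 2
  · simp only [if_pos hn, Bool.false_eq_true, false_iff]
    rintro ⟨h, -⟩; omega
  · rw [not_lt] at hn
    have hn2 : ((n.toNat : Int)) = n := Int.toNat_of_nonneg (by omega)
    rw [if_neg (by omega), List.all_eq_true]
    constructor
    · intro H
      refine ⟨hn, ?_⟩
      rw [Nat.prime_def_le_sqrt]
      refine ⟨by omega, fun m hm2 hms hdvd => ?_⟩
      have hmem : ((m : Int)) ∈ PySem.List.pyRange 2 ((Nat.sqrt n.toNat : Int) + 1) 1 := by
        rw [PySem.List.mem_pyRange_one]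
        constructor
        · exact_mod_cast hm2
        · have : (m : Int) ≤ (Nat.sqrt n.toNat : Int) := by exact_mod_cast hms
          omega
      have h2 := H _ hmem
      simp only [Bool.not_eq_eq_eq_not, Bool.not_true, beq_eq_false_iff_ne, ne_eq] at h2
      apply h2
      rw [PySem.Int.mod_eq_zero_iff_dvd]
      rw [← hn2]
      exact_mod_cast hdvd
    · rintro ⟨-, hp⟩ i hi
      rw [PySem.List.mem_pyRange_one] at hi
      simp only [Bool.not_eq_eq_eq_not, Bool.not_true, beq_eq_false_iff_ne, ne_eq]
      intro h0
      rw [PySem.Int.mod_eq_zero_iff_dvd] at h0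
      rw [Nat.prime_def_le_sqrt] at hp
      refine hp.2 i.toNat (by omega) ?_ ?_
      · have h1 := hi.2
        omega
      · have : ((i.toNat : Int)) = i := Int.toNat_of_nonneg (by omega)
        rw [← hn2] at h0
        rw [← this] at h0
        exact_mod_cast h0

theorem pvWheelB_iff (n : Int) (hn : 5 ≤ n) (h2 : ¬ (2 : Int) ∣ n) (h3 : ¬ (3 : Int) ∣ n) :
    ∀ (fuel : Nat) (f : Nat), n < ((f : Int) + 6 * (fuel : Int)) * ((f : Int) + 6 * (fuel : Int)) →
    f % 6 = 5 → (∀ d : Nat, 2 ≤ d → d < f → ¬ ((d : Int) ∣ n)) →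
    (pvWheelB fuel n f = true ↔ Nat.Prime n.toNat) := by
  have hn0 : ((n.toNat : Int)) = n := Int.toNat_of_nonneg (by omega)
  intro fuel
  induction fuel with
  | zero =>
    intro f hμ hf hinv
    have hgt : ¬ ((f : Int) * (f : Int) ≤ n) := by
      simp only [Nat.cast_zero, mul_zero, add_zero] at hμ; omega
    rw [show pvWheelB 0 n f = true from rfl]
    simp only [true_iff]
    rw [Nat.prime_def_le_sqrt]
    refine ⟨by omega, fun m hm2 hms hdvd => ?_⟩
    have hmm : m * m ≤ n.toNat := by have := Nat.le_sqrt'.mp hms; nlinarith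
    have hff : n.toNat < f * f := by
      have : ((f * f : Nat) : Int) = (f : Int) * (f : Int) := by push_cast; ring
      omega
    have hmf : m < f := by nlinarith
    exact hinv m hm2 hmf (by rw [← hn0]; exact_mod_cast hdvd)
  | succ fuel ih =>
    intro f hμ hf hinv
    rw [pvWheelB]
    by_cases hle : (f : Int) * (f : Int) ≤ n
    · rw [if_pos hle]
      have hf5 : 5 ≤ f := by omega
      have hfn : (f : Int) < n := by nlinarith [Int.natCast_nonneg f]
      have hf2n : (f : Int) + 2 < n := by nlinarith [Int.natCast_nonneg f]
      by_cases hdiv : (PySem.Int.mod n f == 0 || PySem.Int.mod n ((f : Int) + 2) == 0) = true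
      · rw [if_pos hdiv]
        simp only [Bool.false_eq_true, false_iff]
        rcases Bool.or_eq_true_iff.mp hdiv with hd | hd
        · have : (f : Int) ∣ n := by
            rw [← PySem.Int.mod_eq_zero_iff_dvd]; exact beq_iff_eq.mp hd
          exact pvNotPrime n f (by omega) hfn this
        · have : ((f + 2 : Nat) : Int) ∣ n := by
            rw [← PySem.Int.mod_eq_zero_iff_dvd]
            have := beq_iff_eq.mp hd
            push_cast
            exact this
          exact pvNotPrime n (f + 2) (by omega) (by push_cast; omega) this
      · rw [if_neg hdiv]
        simp only [Bool.or_eq_true, not_or, beq_iff_eq] at hdiv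
        have hA : ¬ ((f : Int) ∣ n) := by
          rw [← PySem.Int.mod_eq_zero_iff_dvd]; exact hdiv.1
        have hB : ¬ (((f : Int) + 2) ∣ n) := by
          rw [← PySem.Int.mod_eq_zero_iff_dvd]; exact hdiv.2
        apply ih (f + 6)
        · push_cast at hμ ⊢; nlinarith
        · omega
        · intro d hd2 hdlt hdvd
          by_cases hdf : d < f
          · exact hinv d hd2 hdf hdvd
          · have hd6 : d = f ∨ d = f + 1 ∨ d = f + 2 ∨ d = f + 3 ∨ d = f + 4 ∨ d = f + 5 := by
              omega
            rcases hd6 with rfl | rfl | rfl | rfl | rfl | rfl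
            · exact hA hdvd
            · have he : (2 : Nat) ∣ (f + 1) := by omega
              exact h2 (dvd_trans (by exact_mod_cast he) hdvd)
            · exact hB (by push_cast at hdvd ⊢; exact hdvd)
            · have he : (2 : Nat) ∣ (f + 3) := by omega
              exact h2 (dvd_trans (by exact_mod_cast he) hdvd)
            · have he : (3 : Nat) ∣ (f + 4) := by omega
              exact h3 (dvd_trans (by exact_mod_cast he) hdvd)
            · have he : (2 : Nat) ∣ (f + 5) := by omega
              exact h2 (dvd_trans (by exact_mod_cast he) hdvd)
    · rw [if_neg hle]
      simp only [true_iff]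
      rw [Nat.prime_def_le_sqrt]
      refine ⟨by omega, fun m hm2 hms hdvd => ?_⟩
      have hmm : m * m ≤ n.toNat := by have := Nat.le_sqrt'.mp hms; nlinarith
      have hff : n.toNat < f * f := by
        have : ((f * f : Nat) : Int) = (f : Int) * (f : Int) := by push_cast; ring
        omega
      have hmf : m < f := by nlinarith
      exact hinv m hm2 hmf (by rw [← hn0]; exact_mod_cast hdvd)

theorem pvIsPrimeB_iff (n : Int) : pvIsPrimeB n = true ↔ 2 ≤ n ∧ Nat.Prime n.toNat := by
  unfold pvIsPrimeB
  by_cases h1 : n < 2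
  · simp only [if_pos h1, Bool.false_eq_true, false_iff]; rintro ⟨h, -⟩; omega
  · rw [if_neg h1]
    by_cases h4 : n < 4
    · rw [if_pos h4]
      have : n = 2 ∨ n = 3 := by omega
      rcases this with rfl | rfl
      · simp only [true_iff]; exact ⟨by norm_num, by decide⟩
      · simp only [true_iff]; exact ⟨by norm_num, by decide⟩
    · rw [if_neg h4]
      by_cases hdiv : (PySem.Int.mod n 2 == 0 || PySem.Int.mod n 3 == 0) = true
      · rw [if_pos hdiv]
        simp only [Bool.false_eq_true, false_iff]
        rintro ⟨-, hp⟩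
        rcases Bool.or_eq_true_iff.mp hdiv with hd | hd
        · exact pvNotPrime n 2 le_rfl (by push_cast; omega)
            (by rw [← PySem.Int.mod_eq_zero_iff_dvd]; exact beq_iff_eq.mp hd) hp
        · exact pvNotPrime n 3 (by omega) (by push_cast; omega)
            (by rw [← PySem.Int.mod_eq_zero_iff_dvd]; exact beq_iff_eq.mp hd) hp
      · rw [if_neg hdiv]
        simp only [Bool.or_eq_true, not_or, beq_iff_eq] at hdiv
        have h2 : ¬ (2 : Int) ∣ n := by rw [← PySem.Int.mod_eq_zero_iff_dvd]; exact hdiv.1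
        have h3 : ¬ (3 : Int) ∣ n := by rw [← PySem.Int.mod_eq_zero_iff_dvd]; exact hdiv.2
        have hn5 : 5 ≤ n := by
          rcases lt_or_ge n 5 with h | h
          · exfalso; have : n = 4 := by omega
            exact h2 (by rw [this]; norm_num)
          · exact h
        have htn : ((n.toNat : Int)) = n := Int.toNat_of_nonneg (by omega)
        rw [pvWheelB_iff n hn5 h2 h3 n.toNat 5 (by nlinarith) rfl ?inv]
        case inv =>
          intro d hd2 hd5 hdvd
          have : d = 2 ∨ d = 3 ∨ d = 4 := by omega
          rcases this with rfl | rfl | rfl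
          · exact h2 (by exact_mod_cast hdvd)
          · exact h3 (by exact_mod_cast hdvd)
          · exact h2 (dvd_trans (by norm_num : (2:Int) ∣ 4) (by exact_mod_cast hdvd))
        constructor
        · exact fun hp => ⟨by omega, hp⟩
        · exact fun hp => hp.2

theorem pvIsPrimeA_eq_B (n : Int) : pvIsPrimeA n = pvIsPrimeB n := by
  cases hA : pvIsPrimeA n <;> cases hB : pvIsPrimeB n <;> try rfl
  · exact absurd ((pvIsPrimeA_iff n).mpr ((pvIsPrimeB_iff n).mp hB)) (by rw [hA]; decide)
  · exact absurd ((pvIsPrimeB_iff n).mpr ((pvIsPrimeA_iff n).mp hA)) (by rw [hB]; decide)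

theorem pvNextA_eq (fuel : Nat) (n : Int) : pvNextA fuel n = pvNextB fuel n := by
  induction fuel generalizing n with
  | zero => rfl
  | succ fuel ih =>
    rw [pvNextA, pvNextB, pvIsPrimeA_eq_B]
    by_cases h : pvIsPrimeB n
    · rw [if_pos h, if_pos h]
    · rw [if_neg h, if_neg h, ih]

-- the position of the counter after consuming k primes
def pvAfterB (k : Nat) (c : Int) : Int :=
  match k with
  | 0 => c
  | Nat.succ k => pvAfterB k (pvNextB 18446744073709551616 c + 1)

theorem pvPrimesB_length (k : Nat) (c : Int) : (pvPrimesB k c).length = k := by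
  induction k generalizing c with
  | zero => rfl
  | succ k ih => simp [pvPrimesB, ih]

theorem pvAfterB_add (a b : Nat) (c : Int) :
    pvAfterB (a + b) c = pvAfterB b (pvAfterB a c) := by
  induction a generalizing c with
  | zero => rw [Nat.zero_add]; rfl
  | succ a ih => rw [Nat.succ_add]; exact ih (pvNextB 18446744073709551616 c + 1)

theorem pvPrimesB_add (a b : Nat) (c : Int) :
    pvPrimesB (a + b) c = pvPrimesB a c ++ pvPrimesB b (pvAfterB a c) := by
  induction a generalizing c with
  | zero => rw [Nat.zero_add]; rfl
  | succ a ih => rw [Nat.succ_add]; simp only [pvPrimesB, ih]; rfl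

-- ---- str(p) ends with a decimal digit, for every integer p ----

theorem pvDigitChar_isDigit (k : Nat) (h : k < 10) : (Nat.digitChar k).isDigit = true := by
  interval_cases k <;> decide

theorem pvToDigitsCore_digits : ∀ (fuel n : Nat) (acc : List Char),
    (∀ c ∈ acc, c.isDigit = true) → ∀ c ∈ Nat.toDigitsCore 10 fuel n acc, c.isDigit = true := by
  intro fuel
  induction fuel with
  | zero => intro n acc hacc; rw [Nat.toDigitsCore]; exact hacc
  | succ fuel ih =>
    intro n acc hacc c hc
    rw [Nat.toDigitsCore] at hc
    have hd : (Nat.digitChar (n % 10)).isDigit = true :=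
      pvDigitChar_isDigit _ (Nat.mod_lt _ (by norm_num))
    have hacc' : ∀ c ∈ (Nat.digitChar (n % 10)) :: acc, c.isDigit = true := by
      intro x hx; rcases List.mem_cons.mp hx with rfl | hx
      · exact hd
      · exact hacc x hx
    by_cases h0 : n / 10 = 0
    · rw [if_pos h0] at hc; exact hacc' c hc
    · rw [if_neg h0] at hc; exact ih _ _ hacc' c hc

theorem pvToDigitsCore_length : ∀ (fuel n : Nat) (acc : List Char),
    acc.length ≤ (Nat.toDigitsCore 10 fuel n acc).length := by
  intro fuel
  induction fuel with
  | zero => intro n acc; rw [Nat.toDigitsCore]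
  | succ fuel ih =>
    intro n acc
    rw [Nat.toDigitsCore]
    by_cases h0 : n / 10 = 0
    · rw [if_pos h0]; simp
    · rw [if_neg h0]
      calc acc.length ≤ ((Nat.digitChar (n % 10)) :: acc).length := by simp
        _ ≤ _ := ih _ _

theorem pvToDigits_ne_nil (m : Nat) : Nat.toDigits 10 m ≠ [] := by
  unfold Nat.toDigits
  apply List.ne_nil_of_length_pos
  rw [Nat.toDigitsCore]
  by_cases h0 : m / 10 = 0
  · rw [if_pos h0]; simp
  · rw [if_neg h0]
    calc 0 < ([Nat.digitChar (m % 10)]).length := by simp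
      _ ≤ _ := pvToDigitsCore_length _ _ _

theorem pvToDigits_digits (m : Nat) : ∀ c ∈ Nat.toDigits 10 m, c.isDigit = true := by
  unfold Nat.toDigits
  exact pvToDigitsCore_digits _ _ _ (by simp)

theorem pvDigit_not (c : Char) (h : c.isDigit = true) : (c == ',' || c == ' ') = false := by
  simp only [Char.isDigit] at h
  simp only [Bool.or_eq_false_iff, beq_eq_false_iff_ne, ne_eq]
  constructor <;> rintro rfl <;> simp_all

-- the reversed digit string of any integer starts with a decimal digit
theorem pvToCharsRev (p : Int) :
    ∃ c cs, (PySem.Int.toChars p).reverse = c :: cs ∧ c.isDigit = true := by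
  have key : ∀ m : Nat, ∃ c cs, (Nat.toDigits 10 m).reverse = c :: cs ∧ c.isDigit = true := by
    intro m
    obtain ⟨c, cs, hrev⟩ : ∃ c cs, (Nat.toDigits 10 m).reverse = c :: cs := by
      cases hr : (Nat.toDigits 10 m).reverse with
      | nil => exact absurd (by simpa using hr) (pvToDigits_ne_nil m)
      | cons a b => exact ⟨_, _, rfl⟩
    refine ⟨c, cs, hrev, pvToDigits_digits m c ?_⟩
    have : c ∈ (Nat.toDigits 10 m).reverse := by rw [hrev]; simp
    simpa using this
  unfold PySem.Int.toChars
  by_cases hp : p < 0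
  · rw [if_pos hp]
    obtain ⟨c, cs, hrev, hdig⟩ := key p.natAbs
    exact ⟨c, cs ++ ['-'], by rw [List.reverse_cons, hrev]; rfl, hdig⟩
  · rw [if_neg hp]
    exact key p.toNat

-- ---- rstrip(", ") of a row built as str(p) + ", " per prime ----

theorem pvInterConcat (t d : List Char) (init : List (List Char)) :
    List.intercalate t (init ++ [d]) = (init.map (· ++ t)).flatten ++ d := by
  induction init with
  | nil => simp [List.intercalate]
  | cons i init ih =>
    have h : ∃ b l, init ++ [d] = b :: l := by cases init <;> exact ⟨_, _, rfl⟩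
    obtain ⟨b, l, h⟩ := h
    calc List.intercalate t ((i :: init) ++ [d])
        = i ++ t ++ List.intercalate t (init ++ [d]) := by
          rw [List.cons_append, h]; simp [List.intercalate, List.intersperse]
      _ = _ := by simp [ih]

theorem pvRstripFlat (ds : List (List Char))
    (h : ∀ d ∈ ds, ∃ c cs, d.reverse = c :: cs ∧ c.isDigit = true) :
    (((ds.map (· ++ [',', ' '])).flatten).reverse.dropWhile
        (fun c => c == ',' || c == ' ')).reverse
      = List.intercalate [',', ' '] ds := by
  rcases List.eq_nil_or_concat ds with rfl | ⟨init, d, rfl⟩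
  all_goals try rw [List.concat_eq_append] at *
  · simp [List.intercalate]
  · obtain ⟨c, cs, hrev, hc⟩ := h d (by simp)
    have hcP : (c == ',' || c == ' ') = false := pvDigit_not c hc
    have hflat : ((init ++ [d]).map (· ++ [',', ' '])).flatten
        = (init.map (· ++ [',', ' '])).flatten ++ (d ++ [',', ' ']) := by
      simp
    rw [hflat, pvInterConcat]
    rw [List.reverse_append, List.reverse_append, hrev]
    simp only [List.reverse_cons, List.reverse_nil, List.nil_append, List.cons_append]
    rw [List.dropWhile_cons_of_pos (by decide), List.dropWhile_cons_of_pos (by decide)]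
    rw [List.dropWhile_cons_of_neg (by rw [hcP]; decide)]
    have hd' : d = cs.reverse ++ [c] := by
      have := congrArg List.reverse hrev
      simpa using this
    simp [hd']

-- ---- loop shapes ----

theorem pvFoldl_ignore {α β : Type} (g : α → α) (l : List β) (init : α) :
    l.foldl (fun a _ => g a) init = g^[l.length] init := by
  induction l generalizing init with
  | nil => rfl
  | cons x l ih => simp [ih, Function.iterate_succ_apply]

theorem pvRange_toNat (h : Int) :
    PySem.List.pyRange 0 h 1 = PySem.List.pyRange 0 (h.toNat : Int) 1 := by
  rcases le_or_gt h 0 with h0 | h0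
  · rw [PySem.List.pyRange_one_eq_nil h0, PySem.List.pyRange_one_eq_nil (by omega)]
  · rw [Int.toNat_of_nonneg (by omega)]

-- one row / the whole grid, at the character level
def pvRowCh (w : Nat) (c : Int) : List Char :=
  List.intercalate [',', ' '] ((pvPrimesB w c).map PySem.Int.toChars)

def pvGridCh (w : Nat) (h : Nat) (c : Int) : List Char :=
  match h with
  | 0 => []
  | Nat.succ h => (pvRowCh w c ++ ['\n']) ++ pvGridCh w h (pvAfterB w c)

theorem pvStepInner (w : Nat) : ∀ (s : String) (c : Int),
    ((fun (st2 : String × Int) =>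
        let p := pvNextA 18446744073709551616 st2.2
        (st2.1 ++ (PySem.Int.toStr p ++ ", "), p + 1))^[w] (s, c)) =
      (String.ofList (s.toList ++
        ((pvPrimesB w c).map (fun p => PySem.Int.toChars p ++ [',', ' '])).flatten),
       pvAfterB w c) := by
  induction w with
  | zero =>
    intro s c
    simp [pvPrimesB, pvAfterB]
  | succ w ih =>
    intro s c
    rw [Function.iterate_succ_apply]
    show (fun (st2 : String × Int) =>
        let p := pvNextA 18446744073709551616 st2.2
        (st2.1 ++ (PySem.Int.toStr p ++ ", "), p + 1))^[w]
          (s ++ (PySem.Int.toStr (pvNextA 18446744073709551616 c) ++ ", "), pvNextA 18446744073709551616 c + 1) = _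
    rw [ih]
    simp only [Prod.mk.injEq]
    constructor
    · apply congrArg String.ofList
      simp only [String.toList_append, List.append_assoc]
      rw [pvNextA_eq]
      have h2 : (", " : String).toList = [',', ' '] := rfl
      simp [pvPrimesB, PySem.Int.toList_toStr, h2]
    · simp [pvAfterB, pvNextA_eq]

theorem pvRstripRow (w : Nat) (c : Int) :
    (pvRstripCS (String.ofList
      (((pvPrimesB w c).map (fun p => PySem.Int.toChars p ++ [',', ' '])).flatten))).toList
      = pvRowCh w c := by
  unfold pvRstripCS pvRowCh
  rw [String.toList_ofList, String.toList_ofList]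
  have hmap : (pvPrimesB w c).map (fun p => PySem.Int.toChars p ++ [',', ' '])
      = ((pvPrimesB w c).map PySem.Int.toChars).map (· ++ [',', ' ']) := by
    simp [List.map_map, Function.comp]
  rw [hmap]
  apply pvRstripFlat
  intro d hd
  obtain ⟨p, hp, rfl⟩ := List.mem_map.mp hd
  exact pvToCharsRev p

theorem pvStepOuter (wI : Int) (h : Nat) : ∀ (s : String) (c : Int),
    ((fun (st : String × Int) =>
        let inner := (PySem.List.pyRange 0 wI 1).foldl (fun (st2 : String × Int) _ =>
            let p := pvNextA 18446744073709551616 st2.2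
            (st2.1 ++ (PySem.Int.toStr p ++ ", "), p + 1)) ("", st.2)
        (st.1 ++ (pvRstripCS inner.1 ++ "\n"), inner.2))^[h] (s, c)) =
      (String.ofList (s.toList ++ pvGridCh wI.toNat h c), pvAfterB (wI.toNat * h) c) := by
  induction h with
  | zero =>
    intro s c
    simp [pvGridCh, pvAfterB]
  | succ h ih =>
    intro s c
    have hinner : (PySem.List.pyRange 0 wI 1).foldl (fun (st2 : String × Int) _ =>
        let p := pvNextA 18446744073709551616 st2.2
        (st2.1 ++ (PySem.Int.toStr p ++ ", "), p + 1)) ("", c)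
        = (String.ofList
            (((pvPrimesB wI.toNat c).map (fun p => PySem.Int.toChars p ++ [',', ' '])).flatten),
           pvAfterB wI.toNat c) := by
      rw [pvRange_toNat wI, pvFoldl_ignore, PySem.List.length_pyRange_one,
        show (((wI.toNat : Int)) - 0).toNat = wI.toNat from by omega, pvStepInner]
      simp
    rw [Function.iterate_succ_apply]
    show (fun (st : String × Int) =>
        let inner := (PySem.List.pyRange 0 wI 1).foldl (fun (st2 : String × Int) _ =>
            let p := pvNextA 18446744073709551616 st2.2
            (st2.1 ++ (PySem.Int.toStr p ++ ", "), p + 1)) ("", st.2)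
        (st.1 ++ (pvRstripCS inner.1 ++ "\n"), inner.2))^[h]
          (s ++ (pvRstripCS ((PySem.List.pyRange 0 wI 1).foldl (fun (st2 : String × Int) _ =>
            let p := pvNextA 18446744073709551616 st2.2
            (st2.1 ++ (PySem.Int.toStr p ++ ", "), p + 1)) ("", c)).1 ++ "\n"),
           ((PySem.List.pyRange 0 wI 1).foldl (fun (st2 : String × Int) _ =>
            let p := pvNextA 18446744073709551616 st2.2
            (st2.1 ++ (PySem.Int.toStr p ++ ", "), p + 1)) ("", c)).2) = _
    rw [hinner, ih]
    simp only [Prod.mk.injEq]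
    constructor
    · apply congrArg String.ofList
      simp only [String.toList_append, List.append_assoc]
      rw [pvRstripRow]
      have hnl : ("\n" : String).toList = ['\n'] := rfl
      simp [pvGridCh, hnl]
    · rw [show wI.toNat * (h + 1) = wI.toNat + wI.toNat * h from by ring, pvAfterB_add]

theorem pvA_toList (width height start : Int) :
    (generate_primes_grid width height start).toList
      = pvGridCh width.toNat height.toNat start := by
  unfold generate_primes_grid
  rw [pvRange_toNat height, pvFoldl_ignore, PySem.List.length_pyRange_one,
    show (((height.toNat : Int)) - 0).toNat = height.toNat from by omega, pvStepOuter]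
  simp

-- ---- B side ----

theorem pvSliceNil (a b : Int) : PySem.List.slice ([] : List Int) (some a) (some b) = [] := by
  simp [PySem.List.slice]

theorem pvSlicePrimes (w H r : Nat) (c : Int) (hr : r < H) :
    PySem.List.slice (pvPrimesB (w * H) c)
        (some ((r : Int) * (w : Int))) (some (((r : Int) + 1) * (w : Int)))
      = pvPrimesB w (pvAfterB (w * r) c) := by
  have ha : (r : Int) * (w : Int) = ((r * w : Nat) : Int) := by push_cast; ring
  have hb : ((r : Int) + 1) * (w : Int) = ((r * w : Nat) : Int) + ((w : Nat) : Int) := by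
    push_cast; ring
  rw [ha, hb, PySem.List.slice_natCast_add]
  have h1 : w * (r + 1) = w * r + w := by ring
  have h2 : w * (r + 1) ≤ w * H := Nat.mul_le_mul_left w (by omega)
  rw [show w * H = w * r + (w + (w * H - (w * r + w))) from by omega]
  rw [pvPrimesB_add, pvPrimesB_add]
  rw [show r * w = (pvPrimesB (w * r) c).length from by rw [pvPrimesB_length]; ring,
    List.drop_left]
  have ht := List.take_left (l₁ := pvPrimesB w (pvAfterB (w * r) c))
    (l₂ := pvPrimesB (w * H - (w * r + w)) (pvAfterB w (pvAfterB (w * r) c)))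
  rw [pvPrimesB_length] at ht
  exact ht

theorem pvGrid_succ_right (w h : Nat) (c : Int) :
    pvGridCh w (h + 1) c = pvGridCh w h c ++ (pvRowCh w (pvAfterB (w * h) c) ++ ['\n']) := by
  induction h generalizing c with
  | zero => simp [pvGridCh, pvAfterB]
  | succ h ih =>
    rw [show pvGridCh w (h + 1 + 1) c
        = (pvRowCh w c ++ ['\n']) ++ pvGridCh w (h + 1) (pvAfterB w c) from rfl]
    rw [ih]
    rw [show w * (h + 1) = w + w * h from by ring, pvAfterB_add]
    simp [pvGridCh, List.append_assoc]

theorem pvStepB (wI : Int) (start : Int) (H : Nat) (ps : List Int)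
    (hps : ps = pvPrimesB (wI.toNat * H) start) :
    ∀ h : Nat, h ≤ H →
    ((PySem.List.pyRange 0 (h : Int) 1).foldl (fun out r =>
        out ++ (PySem.Str.join ", "
          ((PySem.List.slice ps (some (r * wI)) (some ((r + 1) * wI))).map PySem.Int.toStr)
          ++ "\n")) "").toList
      = pvGridCh wI.toNat h start := by
  intro h
  induction h with
  | zero =>
    intro _
    rw [show ((0 : Nat) : Int) = 0 from rfl, PySem.List.pyRange_one_eq_nil le_rfl]
    rfl
  | succ h ih =>
    intro hle
    rw [show (((h + 1 : Nat)) : Int) = (h : Int) + 1 from by push_cast; ring,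
      PySem.List.pyRange_one_succ_right (by positivity), List.foldl_append]
    simp only [List.foldl_cons, List.foldl_nil]
    rw [String.toList_append, String.toList_append, ih (by omega)]
    have hnl : ("\n" : String).toList = ['\n'] := rfl
    rcases le_or_gt wI 0 with hw | hw
    · have hw0 : wI.toNat = 0 := by omega
      have hps' : ps = [] := by rw [hps, hw0, Nat.zero_mul]; rfl
      rw [hps', pvSliceNil, pvGrid_succ_right]
      simp [PySem.Str.toList_join, PySem.Chars.join, pvRowCh, hw0, pvPrimesB,
        List.intercalate, hnl]
    · obtain ⟨w, rfl⟩ : ∃ w : Nat, wI = (w : Int) :=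
        ⟨wI.toNat, (Int.toNat_of_nonneg (by omega)).symm⟩
      simp only [Int.toNat_natCast] at hps ⊢
      rw [hps, pvSlicePrimes w H h start (by omega), pvGrid_succ_right]
      have hsep : (", " : String).toList = [',', ' '] := rfl
      simp only [PySem.Str.toList_join, PySem.Chars.join, hsep, hnl, List.map_map]
      congr 2
      unfold pvRowCh
      congr 1
      simp [Function.comp, PySem.Int.toList_toStr]

theorem pvMaxMul (a b : Int) : (max a 0 * max b 0).toNat = a.toNat * b.toNat := by
  rcases le_or_gt a 0 with ha | ha
  · simp [max_eq_right ha, Int.toNat_of_nonpos ha]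
  · rcases le_or_gt b 0 with hb | hb
    · simp [max_eq_right hb, Int.toNat_of_nonpos hb]
    · rw [max_eq_left (show (0:Int) ≤ a by omega), max_eq_left (show (0:Int) ≤ b by omega)]
      exact Int.toNat_mul (by omega) (by omega)

-- ===== VERDICT =====
theorem generate_primes_grid_spec : Claim_equal_generate_primes_grid := by
  intro width height start _
  unfold Spec_generate_primes_grid
  apply String.toList_inj.mp
  rw [pvA_toList]
  unfold generate_primes_grid_alt
  rw [pvRange_toNat height, pvMaxMul]
  rw [pvStepB width start height.toNat _ rfl height.toNat le_rfl]
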